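-- pv_equiv track=rewrite | github.com/CFIA-NCFAD/nf-ionampliseq | bin/qc_csfv_fasta.py | find_n_regions
-- ===== SOURCE A (Python) =====
-- from typing import List, Dict, Tuple, Optional, Any
--
-- def find_n_regions(sequence: str) -> List[Tuple[int, int, int]]:
--     """Find all regions of N characters in the sequence."""
--     n_regions = []
--     in_n_region = False
--     start_pos: Optional[int] = None
--
--     for i, base in enumerate(sequence.upper()):
--         if base == "N":
--             if not in_n_region:
--                 start_pos = i + 1  # 1-based coordinate
--                 in_n_region = True
--         else:
--             if in_n_region and start_pos is not None:  # Check for None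
--                 end_pos = i  # 1-based coordinate (end position of last N)
--                 length = end_pos - start_pos + 1
--                 n_regions.append((start_pos, end_pos, length))
--                 in_n_region = False
--
--     # Handle case where sequence ends with Ns
--     if in_n_region and start_pos is not None:  # Check for None
--         end_pos = len(sequence)
--         length = end_pos - start_pos + 1
--         n_regions.append((start_pos, end_pos, length))
--
--     return n_regions
-- ===== SOURCE B (Python) =====
-- def find_n_regions(sequence):
--     """Find all regions of N characters in the sequence (1-based start, end, length)."""
--     s = sequence.upper()
--     regions = []
--     n = len(s)
--     i = 0
--     while i < n:
--         if s[i] != 'N':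
--             i += 1
--             continue
--         j = i + 1
--         while j < n and s[j] == 'N':
--             j += 1
--         regions.append((i + 1, j, j - i))
--         i = j
--     return regions
-- ===== Notes on version B (the rewrite author's own statement) =====
-- stated objective: alternative
-- what changed: Replaces the in_n_region/start_pos boolean state machine (with a separate trailing-run fixup after the loop) by a two-pointer run scanner that, on meeting an N, consumes the whole maximal run at once and emits its record immediately, so no flags and no post-loop handling are needed.
import Mathlib
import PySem

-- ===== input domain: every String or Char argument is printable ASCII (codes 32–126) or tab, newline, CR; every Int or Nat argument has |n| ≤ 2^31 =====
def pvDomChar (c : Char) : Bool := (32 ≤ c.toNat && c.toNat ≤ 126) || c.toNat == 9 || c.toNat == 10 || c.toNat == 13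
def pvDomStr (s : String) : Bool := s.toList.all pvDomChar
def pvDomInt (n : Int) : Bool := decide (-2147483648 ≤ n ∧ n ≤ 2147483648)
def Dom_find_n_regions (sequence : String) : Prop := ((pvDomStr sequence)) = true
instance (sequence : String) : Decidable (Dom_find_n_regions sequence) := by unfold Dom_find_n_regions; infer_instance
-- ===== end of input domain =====

-- B replaces A's in_n_region/start_pos state machine (plus trailing-run fixup) by a
-- two-pointer scanner that consumes each maximal run of N at once; alternative, same cost.


-- ===== PORT A =====
-- loop body of A's 'for i, base in enumerate(sequence.upper())'
def pvAStep (st : List (Int × Int × Int) × Bool × Option Int) (p : Int × Char) :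
    List (Int × Int × Int) × Bool × Option Int :=
  match st, p with
  | (regs, inN, sp), (i, base) =>
    if base = 'N' then
      if !inN then (regs, true, some (i + 1)) else (regs, inN, sp)
    else
      if inN then
        match sp with
        | some s => (regs ++ [(s, i, i - s + 1)], false, some s)
        | none => (regs, inN, sp)
      else (regs, inN, sp)

-- trailing-run handling after the loop (end_pos = len(sequence))
def pvAFinish (st : List (Int × Int × Int) × Bool × Option Int) (e : Int) :
    List (Int × Int × Int) :=
  match st with
  | (regs, true, some s) => regs ++ [(s, e, e - s + 1)]
  | (regs, _, _) => regs

def find_n_regions (sequence : String) : List (Int × Int × Int) :=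
  pvAFinish
    ((PySem.List.enumerate (PySem.Chars.upper sequence.toList) 0).foldl pvAStep ([], false, none))
    (PySem.Str.len sequence)

-- ===== PORT B =====
-- outer while over s: skip non-N; on an N, the inner while consumes the maximal run
def pvBLoop (l : List Char) (i : Int) : List (Int × Int × Int) :=
  match l with
  | [] => []
  | c :: rest =>
    if c ≠ 'N' then pvBLoop rest (i + 1)
    else
      let k : Int := (rest.takeWhile (· == 'N')).length
      (i + 1, i + 1 + k, 1 + k) :: pvBLoop (rest.dropWhile (· == 'N')) (i + 1 + k)
termination_by l.length
decreasing_by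
  · simp
  · have := List.length_dropWhile_le (p := (· == 'N')) (l := rest); simp; omega

def find_n_regions_alt (sequence : String) : List (Int × Int × Int) :=
  pvBLoop (PySem.Chars.upper sequence.toList) 0

-- ===== PRECONDITION & SPEC =====
def Spec_find_n_regions (sequence : String) (out : List (Int × Int × Int)) : Prop := out = find_n_regions_alt sequence
instance (sequence : String) (out : List (Int × Int × Int)) : Decidable (Spec_find_n_regions sequence out) := by unfold Spec_find_n_regions; infer_instance

-- ===== CLAIM (what is proved, stated in full; the proofs are below) =====
def Claim_equal_find_n_regions : Prop := ∀ (sequence : String), Dom_find_n_regions sequence → Spec_find_n_regions sequence (find_n_regions sequence)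

-- ===== LEMMAS AND PROOFS =====

-- combined invariant for A's fold vs B's run scanner, by strong induction on the length bound:
-- (1) from the not-in-region state the finished fold is regs ++ pvBLoop l i;
-- (2) from the in-region state (start s) it first closes the pending run at i + (leading N count).
theorem pvMain : ∀ (n : Nat) (l : List Char), l.length ≤ n →
    (∀ (i : Int) (regs : List (Int × Int × Int)) (sp : Option Int),
      pvAFinish ((PySem.List.enumerate l i).foldl pvAStep (regs, false, sp)) (i + l.length)
        = regs ++ pvBLoop l i) ∧
    (∀ (i s : Int) (regs : List (Int × Int × Int)),
      pvAFinish ((PySem.List.enumerate l i).foldl pvAStep (regs, true, some s)) (i + l.length)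
        = regs ++ (s, i + (l.takeWhile (· == 'N')).length,
                    i + (l.takeWhile (· == 'N')).length - s + 1)
            :: pvBLoop (l.dropWhile (· == 'N')) (i + (l.takeWhile (· == 'N')).length)) := by
  intro n
  induction n with
  | zero =>
    intro l hl
    have : l = [] := List.eq_nil_of_length_eq_zero (Nat.le_zero.mp hl)
    subst this
    constructor
    · intro i regs sp
      simp [PySem.List.enumerate, pvAFinish, pvBLoop]
    · intro i s regs
      simp [PySem.List.enumerate, pvAFinish, pvBLoop]
  | succ n ih =>
    intro l hl
    match l with
    | [] =>
      constructor
      · intro i regs sp; simp [PySem.List.enumerate, pvAFinish, pvBLoop]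
      · intro i s regs; simp [PySem.List.enumerate, pvAFinish, pvBLoop]
    | c :: rest =>
      have hr : rest.length ≤ n := by simp at hl; omega
      constructor
      · intro i regs sp
        rw [PySem.List.enumerate_cons, List.foldl_cons, pvBLoop]
        by_cases hc : c = 'N'
        · -- enter the region; B emits the run record
          have h2 := (ih rest hr).2 (i + 1) (i + 1) regs
          simp only [pvAStep, hc, Bool.not_false, if_true, ne_eq,
            not_true_eq_false, if_false]
          simp only [List.length_cons]
          push_cast
          have e1 : i + ((rest.length : Int) + 1) = i + 1 + rest.length := by ring
          rw [e1, h2]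
          have e2 : i + 1 + ((rest.takeWhile (· == 'N')).length : Int) - (i + 1) + 1
              = 1 + (rest.takeWhile (· == 'N')).length := by ring
          rw [e2]
        · -- stay out of the region
          have h1 := (ih rest hr).1 (i + 1) regs sp
          simp only [pvAStep, Bool.false_eq_true, if_false, ne_eq, hc,
            not_false_eq_true, if_true]
          simp only [List.length_cons]
          push_cast
          have e1 : i + ((rest.length : Int) + 1) = i + 1 + rest.length := by ring
          rw [e1]
          exact h1
      · intro i s regs
        rw [PySem.List.enumerate_cons, List.foldl_cons]
        by_cases hc : c = 'N'
        · -- run continues: state unchanged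
          have h2 := (ih rest hr).2 (i + 1) s regs
          have hb : (c == 'N') = true := by simp [hc]
          simp only [pvAStep, hc, Bool.not_true, Bool.false_eq_true, if_false,
            List.takeWhile_cons, List.dropWhile_cons, hb, if_true, List.length_cons]
          push_cast
          have e1 : i + ((rest.length : Int) + 1) = i + 1 + rest.length := by ring
          rw [e1, h2]
          simp only [if_pos rfl]
          push_cast [List.length_cons]
          ring_nf
        · -- run closes here with end_pos = i; loop continues out of region (stale start kept)
          have h1 := (ih rest hr).1 (i + 1) (regs ++ [(s, i, i - s + 1)]) (some s)
          have hb : (c == 'N') = false := by simp [hc]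
          simp only [pvAStep, if_neg hc, List.takeWhile_cons, List.dropWhile_cons,
            hb, Bool.false_eq_true, if_false, if_true, List.length_nil, List.length_cons]
          push_cast
          have e1 : i + ((rest.length : Int) + 1) = i + 1 + rest.length := by ring
          rw [e1, h1, pvBLoop]
          simp only [ne_eq, hc, not_false_eq_true, if_true, add_zero,
            List.append_assoc, List.singleton_append]

-- ===== VERDICT (by name: the statement is the Claim_ definition above) =====
theorem find_n_regions_spec : Claim_equal_find_n_regions := by
  intro s _
  unfold Spec_find_n_regions find_n_regions find_n_regions_alt
  have hlen : (PySem.Chars.upper s.toList).length = s.toList.length := by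
    simp [PySem.Chars.upper]
  have h := (pvMain (PySem.Chars.upper s.toList).length (PySem.Chars.upper s.toList) le_rfl).1 0 [] none
  simp only [zero_add] at h
  rw [show PySem.Str.len s = ((PySem.Chars.upper s.toList).length : Int) by
        simp [PySem.Str.len, hlen]]
  rw [h]
  simp
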